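-- pv_equiv track=rewrite | github.com/trailofbits/circuitous | test/full/decoder_test.py | create_test_for_enc
-- ===== SOURCE A (Python) =====
-- def in_a_decode_condition(dcs, bit):
--     for dc in dcs:
--         if bit in range(dc[0], dc[1]):
--             return True
--     return False
--
-- def create_test_for_enc(enc, dc):
--     flip_accept = []
--     flip_deny = []
--
--     for i in range(0, len(enc) * 8):
--         if in_a_decode_condition(dc, i):
--             flip_deny.append(i)
--         else:
--             flip_accept.append(i);
--
--     return flip_accept, flip_deny
-- ===== SOURCE B (Python) =====
-- def create_test_for_enc(enc, dc):
--     n = len(enc) * 8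
--     hit = bytearray(n)
--     for a, b in dc:
--         for i in range(max(a, 0), min(b, n)):
--             hit[i] = 1
--     flip_accept = []
--     flip_deny = []
--     for i in range(n):
--         (flip_deny if hit[i] else flip_accept).append(i)
--     return flip_accept, flip_deny
-- ===== Notes on version B (the rewrite author's own statement) =====
-- stated objective: faster
-- what changed: Instead of testing every bit position against every decode-condition interval, B paints each interval (clipped to [0,n)) once into a hit array and then partitions the bit positions in a single pass.
import Mathlib
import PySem

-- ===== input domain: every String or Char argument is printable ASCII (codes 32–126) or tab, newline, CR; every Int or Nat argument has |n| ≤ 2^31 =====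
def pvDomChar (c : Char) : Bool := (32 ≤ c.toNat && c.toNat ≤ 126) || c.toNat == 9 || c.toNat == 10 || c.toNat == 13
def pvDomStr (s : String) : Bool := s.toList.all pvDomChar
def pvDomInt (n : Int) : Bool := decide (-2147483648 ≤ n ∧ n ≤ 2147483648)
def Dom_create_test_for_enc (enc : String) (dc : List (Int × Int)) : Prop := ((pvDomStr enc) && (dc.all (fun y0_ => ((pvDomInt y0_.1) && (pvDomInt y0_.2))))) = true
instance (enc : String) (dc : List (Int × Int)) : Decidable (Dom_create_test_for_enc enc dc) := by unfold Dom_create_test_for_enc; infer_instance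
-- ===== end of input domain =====

-- B replaces A's per-bit scan over all intervals with a one-time paint of the clipped
-- intervals into a hit array followed by a single partition pass (objective: faster).

-- ===== PORT A =====
def in_a_decode_condition (dcs : List (Int × Int)) (bit : Int) : Bool :=
  match dcs with
  | [] => false
  | p :: rest =>
    if p.1 ≤ bit ∧ bit < p.2 then true
    else in_a_decode_condition rest bit

def create_test_for_enc (enc : String) (dc : List (Int × Int)) : List Int × List Int :=
  (PySem.List.pyRange 0 (PySem.Str.len enc * 8) 1).foldl
    (fun (acc : List Int × List Int) i =>
      if in_a_decode_condition dc i then (acc.1, acc.2 ++ [i]) else (acc.1 ++ [i], acc.2))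
    ([], [])

-- ===== PORT B =====
def create_test_for_enc_alt (enc : String) (dc : List (Int × Int)) : List Int × List Int :=
  let n : Int := PySem.Str.len enc * 8
  let hit : List Bool := dc.foldl
    (fun h p => (PySem.List.pyRange (max p.1 0) (min p.2 n) 1).foldl
      (fun h i => PySem.List.pySetD h i true) h)
    (List.replicate n.toNat false)
  (PySem.List.pyRange 0 n 1).foldl
    (fun (acc : List Int × List Int) i =>
      if PySem.List.pyGetD hit i false then (acc.1, acc.2 ++ [i]) else (acc.1 ++ [i], acc.2))
    ([], [])

-- ===== PRECONDITION & SPEC =====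
def Spec_create_test_for_enc (enc : String) (dc : List (Int × Int)) (out : List Int × List Int) : Prop := out = create_test_for_enc_alt enc dc
instance (enc : String) (dc : List (Int × Int)) (out : List Int × List Int) : Decidable (Spec_create_test_for_enc enc dc out) := by unfold Spec_create_test_for_enc; infer_instance

-- ===== CLAIM (what is proved, stated in full; the proofs are below) =====
def Claim_equal_create_test_for_enc : Prop := ∀ (enc : String) (dc : List (Int × Int)), Dom_create_test_for_enc enc dc → Spec_create_test_for_enc enc dc (create_test_for_enc enc dc)

-- ===== LEMMAS AND PROOFS =====

-- A's helper is an existential scan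
theorem in_a_decode_eq_any (dcs : List (Int × Int)) (bit : Int) :
    in_a_decode_condition dcs bit = dcs.any (fun p => decide (p.1 ≤ bit ∧ bit < p.2)) := by
  induction dcs with
  | nil => rfl
  | cons p rest ih =>
    simp only [in_a_decode_condition, List.any_cons, ih]
    by_cases h : p.1 ≤ bit ∧ bit < p.2 <;> simp [h]

-- painting a range preserves the array length
theorem paint_length (a b : Int) (h : List Bool) :
    ((PySem.List.pyRange a b 1).foldl (fun h i => PySem.List.pySetD h i true) h).length = h.length := by
  induction (PySem.List.pyRange a b 1) generalizing h with
  | nil => rfl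
  | cons x xs ih => simp [List.foldl_cons, ih, PySem.List.length_pySetD]

-- painting [a,b) sets exactly the in-range cells (for a ≥ 0, queried at a Nat index)
theorem paint_get (a b : Int) (ha : 0 ≤ a) (h : List Bool) (k : Nat) :
    PySem.List.pyGetD ((PySem.List.pyRange a b 1).foldl (fun h i => PySem.List.pySetD h i true) h) (k : Int) false
      = (PySem.List.pyGetD h (k : Int) false || decide (a ≤ (k : Int) ∧ (k : Int) < b ∧ k < h.length)) := by
  by_cases hab : b ≤ a
  · rw [PySem.List.pyRange_one_eq_nil hab]
    have : ¬ (a ≤ (k : Int) ∧ (k : Int) < b ∧ k < h.length) := by omega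
    simp [this]
  · rw [not_le] at hab
    rw [PySem.List.pyRange_one_cons hab, List.foldl_cons]
    have ha1 : 0 ≤ a + 1 := by omega
    rw [paint_get (a+1) b ha1 (PySem.List.pySetD h a true) k]
    rw [PySem.List.pySetD_of_nonneg h true ha]
    have hget : PySem.List.pyGetD (h.set a.toNat true) (k : Int) false
        = if k = a.toNat ∧ a.toNat < h.length then true else PySem.List.pyGetD h (k : Int) false := by
      simp only [PySem.List.pyGetD_natCast]
      simp only [List.getD, List.getElem?_set]
      by_cases hk : a.toNat = k
      · subst hk
        by_cases hl : a.toNat < h.length <;> simp [hl]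
      · have : ¬ (k = a.toNat ∧ a.toNat < h.length) := by omega
        simp [hk, this]
    rw [hget, List.length_set]
    by_cases hk : k = a.toNat ∧ a.toNat < h.length
    · have hc : a ≤ (k : Int) ∧ (k : Int) < b ∧ k < h.length := by omega
      rw [if_pos hk, Bool.true_or, decide_eq_true hc, Bool.or_true]
    · have : (a + 1 ≤ (k : Int) ∧ (k : Int) < b ∧ k < h.length) ↔
             (a ≤ (k : Int) ∧ (k : Int) < b ∧ k < h.length) := by omega
      simp only [hk, if_false, this]
termination_by (b - a).toNat
decreasing_by omega

-- painting every clipped interval: a cell is hit iff some clipped interval covers it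
theorem hit_get (n : Int) (dcs : List (Int × Int)) (h : List Bool) (k : Nat) :
    PySem.List.pyGetD
      (dcs.foldl (fun h p => (PySem.List.pyRange (max p.1 0) (min p.2 n) 1).foldl
        (fun h i => PySem.List.pySetD h i true) h) h) (k : Int) false
      = (PySem.List.pyGetD h (k : Int) false ||
         dcs.any (fun p => decide (max p.1 0 ≤ (k : Int) ∧ (k : Int) < min p.2 n ∧ k < h.length))) := by
  induction dcs generalizing h with
  | nil => simp
  | cons p rest ih =>
    simp only [List.foldl_cons, List.any_cons]
    rw [ih, paint_get (max p.1 0) (min p.2 n) (le_max_right _ _), paint_length]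
    simp [Bool.or_assoc]

-- the two per-bit tests agree on every bit of the scanned range
theorem test_agree (enc : String) (dc : List (Int × Int)) (i : Int)
    (h0 : 0 ≤ i) (hn : i < PySem.Str.len enc * 8) :
    PySem.List.pyGetD
      (dc.foldl (fun h p => (PySem.List.pyRange (max p.1 0) (min p.2 (PySem.Str.len enc * 8)) 1).foldl
        (fun h i => PySem.List.pySetD h i true) h)
        (List.replicate (PySem.Str.len enc * 8).toNat false)) i false
      = in_a_decode_condition dc i := by
  set n : Int := PySem.Str.len enc * 8 with hn_def
  have hk : i = ((i.toNat : Nat) : Int) := by omega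
  rw [hk, hit_get n dc _ i.toNat, in_a_decode_eq_any]
  have hrep : PySem.List.pyGetD (List.replicate n.toNat false) ((i.toNat : Nat) : Int) false = false := by
    rw [PySem.List.pyGetD_natCast]
    simp only [List.getD, List.getElem?_replicate]
    split <;> rfl
  rw [hrep, Bool.false_or, List.length_replicate]
  exact List.any_congr rfl (fun p => by rw [decide_eq_decide]; omega)

-- ===== VERDICT (by name: the statement is the Claim_ definition above) =====
theorem create_test_for_enc_spec : Claim_equal_create_test_for_enc := by
  intro enc dc _
  unfold Spec_create_test_for_enc create_test_for_enc create_test_for_enc_alt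
  apply PySem.List.foldl_congr_mem
  intro acc x hx
  rw [PySem.List.mem_pyRange_one] at hx
  rw [test_agree enc dc x hx.1 hx.2]
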